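-- pv_equiv track=rewrite | github.com/emilianodesu/CPCFI_X_LCD | PrepWeek/Magno/Martes/Gold_Rush.py | monton
-- ===== SOURCE A (Python) =====
-- def monton(n, m):
--     pila = [n]
--     visitados = set()
--     while pila:
--         actual = pila.pop()
--         if actual == m:
--             return True
--         if actual < m or actual in visitados:
--             continue
--         visitados.add(actual)
--         if actual % 3 == 0:
--             pila.append(actual // 3)
--             pila.append(2 * (actual // 3))
--     return False
-- ===== SOURCE B (Python) =====
-- def monton(n, m):
--     def reach(x):
--         if x == m:
--             return True
--         if x < m or x % 3 != 0 or x == 0: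
--             return False
--         return reach(x // 3) or reach(2 * (x // 3))
--     return reach(n)
-- ===== Notes on version B (the rewrite author's own statement) =====
-- stated objective: simpler
-- what changed: A's explicit stack + visited-set worklist loop is replaced by a plain recursive descent reach(x) with no stack and no visited set (a direct 0 guard keeps it terminating); memoization cannot change the pure boolean reachability result.
import Mathlib
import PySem

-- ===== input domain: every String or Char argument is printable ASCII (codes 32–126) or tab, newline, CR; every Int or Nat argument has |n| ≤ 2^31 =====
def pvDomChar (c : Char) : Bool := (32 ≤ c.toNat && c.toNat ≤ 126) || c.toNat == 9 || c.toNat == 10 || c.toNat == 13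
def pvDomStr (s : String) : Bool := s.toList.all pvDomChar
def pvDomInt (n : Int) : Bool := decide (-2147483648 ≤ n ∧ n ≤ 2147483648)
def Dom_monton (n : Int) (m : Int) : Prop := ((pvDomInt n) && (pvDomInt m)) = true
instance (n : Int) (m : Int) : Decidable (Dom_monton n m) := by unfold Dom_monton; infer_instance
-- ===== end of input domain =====

-- B replaces A's explicit stack + visited-set worklist by a plain recursive descent with no
-- visited set (memoization cannot change a pure boolean reachability result); objective: simpler.

-- ===== PORT A =====
-- Cited by both ports' decreasing_by: children of an expandable node are strictly smaller in |·|.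
theorem pvChildLt (a : Int) (h3 : PySem.Int.mod a 3 = 0) (h0 : a ≠ 0) :
    (PySem.Int.floordiv a 3).natAbs < a.natAbs ∧
      (2 * PySem.Int.floordiv a 3).natAbs < a.natAbs := by
  obtain ⟨k, hk⟩ := (PySem.Int.mod_eq_zero_iff_dvd a 3).mp h3
  have he : PySem.Int.floordiv a 3 = k := by
    rw [PySem.Int.floordiv_eq_ediv_of_pos (by norm_num), hk,
      Int.mul_ediv_cancel_left k (by norm_num)]
  rw [he]
  subst hk
  constructor <;> omega

-- Cited by montonLoop's decreasing_by: adding a nonzero element does not change whether 0 is visited.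
theorem pvContainsZeroAdd (visitados : PySem.Set Int) (a : Int) (h0 : a ≠ 0) :
    (if PySem.Set.contains (PySem.Set.add visitados a) (0:Int) = true then 0 else 1)
      = (if PySem.Set.contains visitados (0:Int) = true then (0:Nat) else 1) := by
  have hc0 : (PySem.Set.contains (PySem.Set.add visitados a) (0:Int) = true) ↔
      (PySem.Set.contains visitados (0:Int) = true) := by
    simp only [PySem.Set.contains_iff, PySem.Set.mem_add]
    constructor
    · rintro (h | h)
      · exact h
      · exact absurd h.symm h0
    · exact Or.inl
  by_cases h : PySem.Set.contains visitados (0:Int) = true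
  · rw [if_pos (hc0.mpr h), if_pos h]
  · rw [if_neg (fun hh => h (hc0.mp hh)), if_neg h]

-- Python's pila.pop()/append work at the END of the list; here the stack top is the list HEAD,
-- so the two appends become two conses in reversed order (same pop order as Python).
def montonLoop (m : Int) (pila : List Int) (visitados : PySem.Set Int) : Bool :=
  match pila with
  | [] => false
  | actual :: rest =>
    if actual = m then true
    else if actual < m ∨ PySem.Set.contains visitados actual = true then
      montonLoop m rest visitados
    else
      let visitados' := PySem.Set.add visitados actual
      if PySem.Int.mod actual 3 = 0 then
        montonLoop m (2 * PySem.Int.floordiv actual 3 :: PySem.Int.floordiv actual 3 :: rest)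
          visitados'
      else
        montonLoop m rest visitados'
termination_by ((if PySem.Set.contains visitados 0 = true then 0 else 1),
  (pila.map (fun x => 3 ^ x.natAbs)).sum)
decreasing_by
  · apply Prod.Lex.right
    simp only [List.map_cons, List.sum_cons]
    have : 0 < 3 ^ actual.natAbs := Nat.pow_pos (by norm_num)
    omega
  · rename_i hne hskip h3
    by_cases h0 : actual = 0
    · apply Prod.Lex.left
      subst h0
      have hnc : ¬ PySem.Set.contains visitados (0:Int) = true := by tauto
      have hadd : PySem.Set.contains (PySem.Set.add visitados (0:Int)) 0 = true :=
        (PySem.Set.contains_iff _ _).mpr ((PySem.Set.mem_add _ _ _).mpr (Or.inr rfl))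
      rw [if_pos hadd, if_neg hnc]
      omega
    · rw [pvContainsZeroAdd visitados actual h0]
      apply Prod.Lex.right
      obtain ⟨h1, h2⟩ := pvChildLt actual h3 h0
      simp only [List.map_cons, List.sum_cons]
      have e1 : 3 ^ (2 * PySem.Int.floordiv actual 3).natAbs ≤ 3 ^ (actual.natAbs - 1) :=
        Nat.pow_le_pow_right (by norm_num) (by omega)
      have e2 : 3 ^ (PySem.Int.floordiv actual 3).natAbs ≤ 3 ^ (actual.natAbs - 1) :=
        Nat.pow_le_pow_right (by norm_num) (by omega)
      have e3 : 3 ^ actual.natAbs = 3 * 3 ^ (actual.natAbs - 1) := by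
        conv_lhs => rw [show actual.natAbs = (actual.natAbs - 1) + 1 by omega]
        rw [Nat.pow_succ]; ring
      have e4 : 0 < 3 ^ (actual.natAbs - 1) := Nat.pow_pos (by norm_num)
      omega
  · rename_i hne hskip h3
    have h0 : actual ≠ 0 := by
      intro h; subst h; exact h3 (by decide)
    rw [pvContainsZeroAdd visitados actual h0]
    apply Prod.Lex.right
    simp only [List.map_cons, List.sum_cons]
    have : 0 < 3 ^ actual.natAbs := Nat.pow_pos (by norm_num)
    omega

def monton (n : Int) (m : Int) : Bool :=
  montonLoop m [n] PySem.Set.empty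

-- ===== PORT B =====
def reach (m : Int) (x : Int) : Bool :=
  if x = m then true
  else if x < m ∨ PySem.Int.mod x 3 ≠ 0 ∨ x = 0 then false
  else reach m (PySem.Int.floordiv x 3) || reach m (2 * PySem.Int.floordiv x 3)
termination_by x.natAbs
decreasing_by
  · rename_i h1 h2
    push_neg at h2
    exact (pvChildLt x h2.2.1 h2.2.2).1
  · rename_i h1 h2
    push_neg at h2
    exact (pvChildLt x h2.2.1 h2.2.2).2

def monton_alt (n : Int) (m : Int) : Bool := reach m n

-- ===== PRECONDITION & SPEC =====
def Spec_monton (n : Int) (m : Int) (out : Bool) : Prop := out = monton_alt n m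
instance (n : Int) (m : Int) (out : Bool) : Decidable (Spec_monton n m out) := by unfold Spec_monton; infer_instance

-- ===== CLAIM (what is proved, stated in full; the proofs are below) =====
def Claim_equal_monton : Prop := ∀ (n : Int) (m : Int), Dom_monton n m → Spec_monton n m (monton n m)

-- ===== LEMMAS AND PROOFS =====
theorem reach_self (m : Int) : reach m m = true := by
  rw [reach]; simp

theorem reach_dead (m x : Int) (hne : x ≠ m)
    (h : x < m ∨ PySem.Int.mod x 3 ≠ 0 ∨ x = 0) : reach m x = false := by
  rw [reach, if_neg hne, if_pos h]

theorem reach_expand (m x : Int) (hne : x ≠ m) (hge : ¬ x < m)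
    (h3 : PySem.Int.mod x 3 = 0) (h0 : x ≠ 0) :
    reach m x = (reach m (PySem.Int.floordiv x 3) || reach m (2 * PySem.Int.floordiv x 3)) := by
  rw [reach, if_neg hne, if_neg (by push_neg; exact ⟨by omega, h3, h0⟩)]

-- If a node x with x ≠ m reaches m then x ≠ 0 (reach m 0 is false unless m = 0).
theorem reach_ne_zero (m x : Int) (hne : x ≠ m) (hr : reach m x = true) : x ≠ 0 := by
  intro hz
  rw [reach_dead m x hne (Or.inr (Or.inr hz))] at hr
  cases hr

-- Invariant: any visited node that reaches m is witnessed on the stack by a strictly smaller reacher.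
def pvJ (m : Int) (pila : List Int) (vis : List Int) : Prop :=
  ∀ v ∈ vis, reach m v = true → ∃ c ∈ pila, reach m c = true ∧ c.natAbs < v.natAbs

theorem pvJ_drop (m a : Int) (rest vis : List Int)
    (hJ : pvJ m (a :: rest) vis) (ha : reach m a = false ∨ a ∈ vis) : pvJ m rest vis := by
  suffices H : ∀ N : Nat, ∀ v, v.natAbs < N → v ∈ vis → reach m v = true →
      ∃ c ∈ rest, reach m c = true ∧ c.natAbs < v.natAbs by
    intro v hv hr; exact H (v.natAbs + 1) v (by omega) hv hr
  intro N
  induction N with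
  | zero => intro v h; omega
  | succ N ih =>
    intro v hvN hv hr
    obtain ⟨c, hc, hrc, hlt⟩ := hJ v hv hr
    rcases List.mem_cons.mp hc with rfl | hcrest
    · rcases ha with hfa | hav
      · rw [hrc] at hfa; cases hfa
      · obtain ⟨c', hc', hrc', hlt'⟩ := ih c (by omega) hav hrc
        exact ⟨c', hc', hrc', by omega⟩
    · exact ⟨c, hcrest, hrc, hlt⟩

theorem pvSound (m : Int) : ∀ pila vis, montonLoop m pila vis = true →
    ∃ c ∈ pila, reach m c = true := by
  intro pila vis
  fun_induction montonLoop m pila vis with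
  | case1 vis => intro h; cases h
  | case2 vis rest => intro _; exact ⟨m, by simp, reach_self m⟩
  | case3 vis actual rest hne hskip ih =>
    intro h
    obtain ⟨c, hc, hrc⟩ := ih h
    exact ⟨c, by simp [hc], hrc⟩
  | case4 vis actual rest hne hskip visL h3 ih =>
    intro h
    obtain ⟨c, hc, hrc⟩ := ih h
    have hexp : (reach m (PySem.Int.floordiv actual 3) = true ∨
        reach m (2 * PySem.Int.floordiv actual 3) = true) → reach m actual = true := by
      intro hch
      have h0 : actual ≠ 0 := by
        intro hz
        have hfz : PySem.Int.floordiv actual 3 = 0 := by subst hz; decide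
        rcases hch with h | h <;> rw [hfz] at h <;>
          exact absurd (reach_ne_zero m _ (by subst hz; simpa using hne) h) (by simp [hz])
      rw [reach_expand m actual hne (fun h => hskip (Or.inl h)) h3 h0]
      rcases hch with h | h
      · rw [h]; rfl
      · rw [h, Bool.or_true]
    rcases List.mem_cons.mp hc with rfl | hc'
    · exact ⟨actual, by simp, hexp (Or.inr hrc)⟩
    · rcases List.mem_cons.mp hc' with rfl | hc''
      · exact ⟨actual, by simp, hexp (Or.inl hrc)⟩
      · exact ⟨c, by simp [hc''], hrc⟩
  | case5 vis actual rest hne hskip visL h3 ih =>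
    intro h
    obtain ⟨c, hc, hrc⟩ := ih h
    exact ⟨c, by simp [hc], hrc⟩

theorem pvComplete (m : Int) : ∀ pila vis, pvJ m pila vis →
    (∃ c ∈ pila, reach m c = true) → montonLoop m pila vis = true := by
  intro pila vis
  fun_induction montonLoop m pila vis with
  | case1 vis => rintro _ ⟨c, hc, _⟩; cases hc
  | case2 vis rest => intro _ _; rfl
  | case3 vis actual rest hne hskip ih =>
    intro hJ hex
    have hvisOrDead : reach m actual = false ∨ actual ∈ vis := by
      rcases hskip with hlt | hcont
      · exact Or.inl (reach_dead m actual hne (Or.inl hlt))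
      · exact Or.inr ((PySem.Set.contains_iff _ _).mp hcont)
    have hJ' : pvJ m rest vis := pvJ_drop m actual rest vis hJ hvisOrDead
    apply ih hJ'
    obtain ⟨c, hc, hrc⟩ := hex
    rcases List.mem_cons.mp hc with heq | hc'
    · rw [heq] at hrc
      rcases hvisOrDead with hfa | hav
      · rw [hrc] at hfa; cases hfa
      · obtain ⟨c', hc', hrc', _⟩ := pvJ_drop m actual rest vis hJ (Or.inr hav) actual hav hrc
        exact ⟨c', hc', hrc'⟩
    · exact ⟨c, hc', hrc⟩
  | case4 vis actual rest hne hskip visL h3 ih =>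
    intro hJ hex
    have hge : ¬ actual < m := fun h => hskip (Or.inl h)
    have hnv : actual ∉ vis := fun h => hskip (Or.inr ((PySem.Set.contains_iff _ _).mpr h))
    have hchild : ∀ v : Int, v = actual → reach m v = true →
        v ≠ 0 ∧ (reach m (PySem.Int.floordiv actual 3) = true ∨
          reach m (2 * PySem.Int.floordiv actual 3) = true) := by
      rintro v rfl hr
      have h0 : v ≠ 0 := reach_ne_zero m v hne hr
      refine ⟨h0, ?_⟩
      rw [reach_expand m v hne hge h3 h0] at hr
      rcases Bool.or_eq_true_iff.mp hr with h | h
      · exact Or.inl h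
      · exact Or.inr h
    apply ih
    · intro v hv hrv
      rcases (PySem.Set.mem_add _ _ _).mp hv with hv' | rfl
      · obtain ⟨c, hc, hrc, hlt⟩ := hJ v hv' hrv
        rcases List.mem_cons.mp hc with rfl | hcrest
        · obtain ⟨h0, hch⟩ := hchild c rfl hrc
          obtain ⟨hlt1, hlt2⟩ := pvChildLt c h3 h0
          rcases hch with h | h
          · exact ⟨PySem.Int.floordiv c 3, by simp, h, by omega⟩
          · exact ⟨2 * PySem.Int.floordiv c 3, by simp, h, by omega⟩
        · exact ⟨c, by simp [hcrest], hrc, hlt⟩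
      · obtain ⟨h0, hch⟩ := hchild v rfl hrv
        obtain ⟨hlt1, hlt2⟩ := pvChildLt v h3 h0
        rcases hch with h | h
        · exact ⟨PySem.Int.floordiv v 3, by simp, h, by omega⟩
        · exact ⟨2 * PySem.Int.floordiv v 3, by simp, h, by omega⟩
    · obtain ⟨c, hc, hrc⟩ := hex
      rcases List.mem_cons.mp hc with rfl | hcrest
      · obtain ⟨h0, hch⟩ := hchild c rfl hrc
        rcases hch with h | h
        · exact ⟨PySem.Int.floordiv c 3, by simp, h⟩
        · exact ⟨2 * PySem.Int.floordiv c 3, by simp, h⟩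
      · exact ⟨c, by simp [hcrest], hrc⟩
  | case5 vis actual rest hne hskip visL h3 ih =>
    intro hJ hex
    have hfa : reach m actual = false := reach_dead m actual hne (Or.inr (Or.inl h3))
    apply ih
    · intro v hv hrv
      rcases (PySem.Set.mem_add _ _ _).mp hv with hv' | rfl
      · exact pvJ_drop m actual rest vis hJ (Or.inl hfa) v hv' hrv
      · rw [hfa] at hrv; cases hrv
    · obtain ⟨c, hc, hrc⟩ := hex
      rcases List.mem_cons.mp hc with rfl | hcrest
      · rw [hfa] at hrc; cases hrc
      · exact ⟨c, hcrest, hrc⟩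

-- ===== VERDICT (by name: the statement is the Claim_ definition above) =====
theorem monton_spec : Claim_equal_monton := by
  unfold Claim_equal_monton
  intro n m _
  unfold Spec_monton monton monton_alt
  cases hr : reach m n with
  | true =>
    exact pvComplete m [n] PySem.Set.empty (by intro v hv; cases hv) ⟨n, by simp, hr⟩
  | false =>
    cases hl : montonLoop m [n] PySem.Set.empty with
    | false => rfl
    | true =>
      obtain ⟨c, hc, hrc⟩ := pvSound m [n] PySem.Set.empty hl
      rw [List.mem_singleton.mp hc] at hrc
      rw [hr] at hrc
      cases hrc
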